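-- pv_equiv track=rewrite | github.com/afonsohfontes/defects4j | framework/test/Experiments/4-editandReduce.py | adjusted_cumulative_coverage
-- ===== SOURCE A (Python) =====
-- def adjusted_cumulative_coverage(timeline):
--     cumulative_timeline = []
--     cumulative_bits = '0' * len(timeline[0])
--
--     for bitstring in timeline:
--         new_bits = ''
--         for index, bit in enumerate(bitstring):
--             new_bit = '1' if bit == '1' or cumulative_bits[index] == '1' else '0'
--             new_bits += new_bit
--         cumulative_bits = new_bits
--         cumulative_timeline.append(new_bits)
--
--     return cumulative_timeline
-- ===== SOURCE B (Python) =====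
-- def adjusted_cumulative_coverage(timeline):
--     # pass 1: index the first row in which each column shows a '1'
--     first_one = {}
--     for j, s in enumerate(timeline):
--         for i in range(len(s)):
--             if s[i] == '1' and i not in first_one:
--                 first_one[i] = j
--     # pass 2: render each row straight from the index
--     n = len(timeline)
--     return [''.join('1' if first_one.get(i, n) <= j else '0'
--                     for i in range(len(s)))
--             for j, s in enumerate(timeline)]
-- ===== Notes on version B (the rewrite author's own statement) =====
-- stated objective: alternative
-- what changed: B removes A's running cumulative-bits accumulator entirely: a first pass builds a dict mapping each column to the first row index showing a '1' there, and a second pass renders every row independently by comparing that index with the row number.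
import Mathlib
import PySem

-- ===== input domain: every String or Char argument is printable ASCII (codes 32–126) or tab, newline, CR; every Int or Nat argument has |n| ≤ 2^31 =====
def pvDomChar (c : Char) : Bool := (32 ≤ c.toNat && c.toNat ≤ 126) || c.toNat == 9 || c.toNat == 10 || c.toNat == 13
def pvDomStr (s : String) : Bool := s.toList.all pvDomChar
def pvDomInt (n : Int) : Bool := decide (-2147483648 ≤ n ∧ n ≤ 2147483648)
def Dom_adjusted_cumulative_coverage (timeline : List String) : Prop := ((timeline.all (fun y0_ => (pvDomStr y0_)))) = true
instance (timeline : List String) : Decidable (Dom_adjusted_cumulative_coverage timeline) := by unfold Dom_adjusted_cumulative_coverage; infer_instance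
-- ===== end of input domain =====

-- B drops A's running cumulative-bits accumulator: pass 1 builds a dict indexing, per column, the
-- first row showing a '1'; pass 2 renders every row straight from that index (objective: alternative).

-- ===== PORT A =====
-- inner loop: new_bits built character by character; cum[index] raises in Python when out of
-- range, but only when 'bit == "1"' does not short-circuit — Pre_ excludes exactly those inputs,
-- so the total pyGet?.getD '0' is exact inside Pre_.
def pvRowA (cum : List Char) (s : List Char) : List Char :=
  (PySem.List.enumerate s).foldl
    (fun acc p =>
      acc ++ [if p.2 = '1' ∨ (PySem.List.pyGet? cum p.1).getD '0' = '1' then '1' else '0']) []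

def adjusted_cumulative_coverage (timeline : List String) : List String :=
  -- timeline[0] raises IndexError on []; Pre_ excludes it, headD "" is exact otherwise
  let cum0 : List Char := List.replicate (timeline.headD "").toList.length '0'
  (timeline.foldl
    (fun (st : List Char × List String) bs =>
      let nb := pvRowA st.1 bs.toList
      (nb, st.2 ++ [String.ofList nb]))
    (cum0, [])).2

-- ===== PORT B =====
-- pass 1: 'if s[i] == '1' and i not in first_one: first_one[i] = j'; s[i] is in range (i from range(len(s)))
def pvFirstOne (timeline : List String) : PySem.Dict Int Int :=
  (PySem.List.enumerate timeline).foldl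
    (fun d p =>
      (PySem.List.pyRange 0 (p.2.toList.length : Int) 1).foldl
        (fun d i =>
          if PySem.List.pyGetD p.2.toList i 'x' = '1' ∧ d.contains i = false
          then d.insert i p.1 else d) d)
    PySem.Dict.empty

-- pass 2: '1' iff first_one.get(i, n) <= j
def adjusted_cumulative_coverage_alt (timeline : List String) : List String :=
  let firstOne := pvFirstOne timeline
  let n : Int := timeline.length
  (PySem.List.enumerate timeline).map (fun p =>
    String.ofList ((PySem.List.pyRange 0 (p.2.toList.length : Int) 1).map
      (fun i => if firstOne.getD i n ≤ p.1 then '1' else '0')))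

-- ===== PRECONDITION & SPEC =====
-- Pre_ excludes exactly the inputs where the Python A raises IndexError: the empty timeline
-- (timeline[0]) and timelines where some row is longer than its predecessor and carries a
-- character other than '1' in the overhang (cum[index] out of range, not short-circuited).
def Pre_adjusted_cumulative_coverage (timeline : List String) : Prop :=
  timeline ≠ [] ∧
  List.IsChain (fun a b : String => (b.toList.drop a.toList.length).all (· = '1') = true) timeline
instance (timeline : List String) : Decidable (Pre_adjusted_cumulative_coverage timeline) := by
  unfold Pre_adjusted_cumulative_coverage; infer_instance

def pvWitness_adjusted_cumulative_coverage : List String := ["0101", "1010", "0011"]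

def Spec_adjusted_cumulative_coverage (timeline : List String) (out : List String) : Prop :=
  out = adjusted_cumulative_coverage_alt timeline
instance (timeline : List String) (out : List String) :
    Decidable (Spec_adjusted_cumulative_coverage timeline out) := by
  unfold Spec_adjusted_cumulative_coverage; infer_instance

-- ===== CLAIM (what is proved, stated in full; the proofs are below) =====
def Claim_equal_adjusted_cumulative_coverage : Prop :=
  ∀ (timeline : List String), Dom_adjusted_cumulative_coverage timeline →
    Pre_adjusted_cumulative_coverage timeline →
    Spec_adjusted_cumulative_coverage timeline (adjusted_cumulative_coverage timeline)

-- ===== LEMMAS AND PROOFS =====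

-- 'row s shows a 1 in column i'
def pvHas1 (s : String) (i : Nat) : Bool :=
  decide (i < s.toList.length) && decide (s.toList.getD i 'x' = '1')

-- 'some row of pref shows a 1 in column i'
def pvAnyB (pref : List String) (i : Nat) : Bool := pref.any (fun s => pvHas1 s i)

def pvRenderN (pref : List String) (n : Nat) : List Char :=
  (List.range n).map (fun i => if pvAnyB pref i then '1' else '0')

-- common recursive shape both sides are reduced to
def pvBRec : List String → List String → List String
  | _, [] => []
  | pref, b :: tl => String.ofList (pvRenderN (pref ++ [b]) b.toList.length) :: pvBRec (pref ++ [b]) tl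

theorem pvRowA_eq_map (cum s : List Char) :
    pvRowA cum s = (PySem.List.enumerate s).map
      (fun p => if p.2 = '1' ∨ (PySem.List.pyGet? cum p.1).getD '0' = '1' then '1' else '0') := by
  unfold pvRowA
  rw [PySem.List.foldl_append_singleton_eq_map]
  rfl

theorem pvGetD_char (cum : List Char) (k : Nat) :
    ((cum[k]?).getD '0' = '1') ↔ (k < cum.length ∧ cum.getD k 'x' = '1') := by
  by_cases hk : k < cum.length
  · simp [List.getD_eq_getElem?_getD, hk]
  · have h0 : cum[k]? = none := List.getElem?_eq_none (Nat.le_of_not_lt hk)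
    simp [List.getD_eq_getElem?_getD, hk]

theorem pvStepNew (pref : List String) (a b : String) (cum : List Char)
    (hlen : cum.length = a.toList.length)
    (hinv : ∀ i, i < cum.length → (cum.getD i 'x' = '1' ↔ pvAnyB pref i = true))
    (hR : (b.toList.drop a.toList.length).all (· = '1') = true) :
    pvRowA cum b.toList = pvRenderN (pref ++ [b]) b.toList.length := by
  rw [pvRowA_eq_map]
  unfold pvRenderN
  apply List.ext_getElem
  · simp [PySem.List.length_enumerate]
  · intro k h1 h2
    have hk : k < b.toList.length := by simpa [PySem.List.length_enumerate] using h1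
    simp only [List.getElem_map, PySem.List.getElem_enumerate, List.getElem_range]
    have hget : PySem.List.pyGet? cum ((0:Int) + ↑k) = cum[k]? := by
      rw [zero_add, PySem.List.pyGet?_natCast]
    rw [hget]
    have hsingle : pvAnyB [b] k = decide (b.toList[k] = '1') := by
      unfold pvAnyB pvHas1
      rw [List.any_cons, List.any_nil, Bool.or_false, List.getD_eq_getElem?_getD,
        List.getElem?_eq_getElem hk, Option.getD_some, decide_eq_true hk, Bool.true_and]
    have happ : pvAnyB (pref ++ [b]) k = (pvAnyB pref k || pvAnyB [b] k) := by
      unfold pvAnyB; rw [List.any_append]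
    have hIff : (b.toList[k] = '1' ∨ (cum[k]?).getD '0' = '1') ↔ pvAnyB (pref ++ [b]) k = true := by
      constructor
      · rintro (h1' | h2')
        · rw [happ, hsingle, decide_eq_true h1', Bool.or_true]
        · obtain ⟨hlt, hval⟩ := (pvGetD_char cum k).1 h2'
          rw [happ, (hinv k hlt).1 hval, Bool.true_or]
      · intro hany
        rw [happ, Bool.or_eq_true] at hany
        rcases hany with hp | hbb
        · by_cases hlt : k < cum.length
          · exact Or.inr ((pvGetD_char cum k).2 ⟨hlt, (hinv k hlt).2 hp⟩)
          · -- k ≥ len a: the overhang of b is all '1' by the chain condition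
            have hka : a.toList.length ≤ k := by omega
            have hmem : b.toList[k] ∈ b.toList.drop a.toList.length := by
              rw [List.mem_iff_getElem]
              refine ⟨k - a.toList.length, by rw [List.length_drop]; omega, ?_⟩
              rw [List.getElem_drop]
              congr 1
              omega
            exact Or.inl (by simpa using List.all_eq_true.1 hR _ hmem)
        · rw [hsingle] at hbb
          exact Or.inl (of_decide_eq_true hbb)
    by_cases hc : (b.toList[k] = '1' ∨ (cum[k]?).getD '0' = '1')
    · rw [if_pos hc, if_pos (hIff.1 hc)]
    · rw [if_neg hc, if_neg (fun hh => hc (hIff.2 hh))]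

theorem pvRenderN_length (pref : List String) (n : Nat) : (pvRenderN pref n).length = n := by
  simp [pvRenderN]

theorem pvRenderN_getD (pref : List String) (n i : Nat) (hi : i < n) :
    (pvRenderN pref n).getD i 'x' = (if pvAnyB pref i then '1' else '0') := by
  unfold pvRenderN
  simp [List.getD_eq_getElem?_getD, hi]

theorem pvA_fold (rest : List String) (pref : List String) (a : String) (cum : List Char)
    (acc : List String)
    (hch : List.IsChain (fun a b : String => (b.toList.drop a.toList.length).all (· = '1') = true)
      (a :: rest))
    (hlen : cum.length = a.toList.length)
    (hinv : ∀ i, i < cum.length → (cum.getD i 'x' = '1' ↔ pvAnyB pref i = true)) :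
    (rest.foldl
      (fun (st : List Char × List String) bs =>
        let nb := pvRowA st.1 bs.toList
        (nb, st.2 ++ [String.ofList nb])) (cum, acc)).2 = acc ++ pvBRec pref rest := by
  induction rest generalizing pref a cum acc with
  | nil => simp [pvBRec]
  | cons b tl ih =>
    cases hch with
    | cons_cons hR hch' =>
      simp only [List.foldl_cons]
      rw [pvStepNew pref a b cum hlen hinv hR]
      rw [ih (pref ++ [b]) b (pvRenderN (pref ++ [b]) b.toList.length) _ hch'
        (pvRenderN_length _ _) ?_]
      · simp [pvBRec]
      · intro i hi
        rw [pvRenderN_length] at hi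
        rw [pvRenderN_getD _ _ _ hi]
        by_cases h : pvAnyB (pref ++ [b]) i = true <;> simp [h]

theorem pvB_rec_eq (rest pref : List String) :
    (List.range rest.length).map
      (fun j => String.ofList (pvRenderN ((pref ++ rest).take (pref.length + (j + 1)))
        (((pref ++ rest).getD (pref.length + j) "").toList.length))) = pvBRec pref rest := by
  induction rest generalizing pref with
  | nil => simp [pvBRec]
  | cons b tl ih =>
    rw [List.length_cons, List.range_succ_eq_map, List.map_cons, List.map_map]
    unfold pvBRec
    congr 1
    · have h1 : (pref ++ b :: tl).take (pref.length + 1) = pref ++ [b] := by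
        rw [List.take_append]; simp
      have h2 : (pref ++ b :: tl).getD pref.length "" = b := by
        simp [List.getD_eq_getElem?_getD]
      simp [h1]
    · rw [← ih (pref ++ [b])]
      apply List.map_congr_left
      intro j _
      have e1 : pref ++ b :: tl = (pref ++ [b]) ++ tl := by simp
      have e2 : pref.length + (j + 1 + 1) = (pref ++ [b]).length + (j + 1) := by
        simp; omega
      have e3 : pref.length + (j + 1) = (pref ++ [b]).length + j := by
        simp; omega
      simp only [Function.comp_apply, Nat.succ_eq_add_one, e1, e2, e3]

theorem pvB_rec_nil (rest : List String) :
    (List.range rest.length).map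
      (fun j => String.ofList (pvRenderN (rest.take (j + 1)) ((rest.getD j "").toList.length))) =
    pvBRec [] rest := by
  simpa using pvB_rec_eq rest []

-- ---- characterisation of B's first-occurrence dict ----

theorem pvHas1_iff (s : String) (i : Nat) :
    pvHas1 s i = true ↔ (i < s.toList.length ∧ s.toList.getD i 'x' = '1') := by
  simp [pvHas1]

theorem pvInner_get? (cs : List Char) (jrow : Int) (n : Nat) (d : PySem.Dict Int Int) (i : Nat) :
    (((List.range n).map (fun (k : Nat) => (k : Int))).foldl
      (fun d i' => if PySem.List.pyGetD cs i' 'x' = '1' ∧ d.contains i' = false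
                   then d.insert i' jrow else d) d).get? ↑i =
    if d.contains ↑i = true then d.get? ↑i
    else if i < n ∧ cs.getD i 'x' = '1' then some jrow else none := by
  induction n with
  | zero =>
    simp only [List.range_zero, List.map_nil, List.foldl_nil]
    by_cases hc : d.contains ↑i = true
    · rw [if_pos hc]
    · rw [if_neg hc, if_neg (by omega : ¬ (i < 0 ∧ cs.getD i 'x' = '1'))]
      exact (PySem.Dict.get?_eq_none_iff_contains d ↑i).2 (by simpa using hc)
  | succ n ih =>
    rw [List.range_succ, List.map_append, List.foldl_append]
    simp only [List.map_cons, List.map_nil, List.foldl_cons, List.foldl_nil,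
      PySem.List.pyGetD_natCast]
    set dn := (((List.range n).map (fun (k : Nat) => (k : Int))).foldl
      (fun d i' => if PySem.List.pyGetD cs i' 'x' = '1' ∧ d.contains i' = false
                   then d.insert i' jrow else d) d) with hdn
    by_cases hin : i = n
    · subst hin
      have hget : dn.get? ↑i = if d.contains ↑i = true then d.get? ↑i else none := by
        rw [hdn, ih]
        by_cases hc : d.contains ↑i = true
        · rw [if_pos hc, if_pos hc]
        · rw [if_neg hc, if_neg hc, if_neg (by simp : ¬ (i < i ∧ cs.getD i 'x' = '1'))]
      by_cases hc : d.contains ↑i = true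
      · have hdc : dn.contains ↑i = true := by
          rw [PySem.Dict.contains_eq_isSome_get?, hget, if_pos hc,
            ← PySem.Dict.contains_eq_isSome_get?, hc]
        rw [if_neg (by simp [hdc]), hget, if_pos hc, if_pos hc]
      · have hdc : dn.contains ↑i = false := by
          rw [PySem.Dict.contains_eq_isSome_get?, hget, if_neg hc]
          rfl
        rw [if_neg hc]
        by_cases hv : cs.getD i 'x' = '1'
        · rw [if_pos ⟨hv, hdc⟩, PySem.Dict.get?_insert_self, if_pos ⟨by omega, hv⟩]
        · rw [if_neg (by tauto), hget, if_neg hc, if_neg (by tauto)]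
    · have hne : (↑i : Int) ≠ ↑n := by exact_mod_cast hin
      have hstep :
          (if cs.getD n 'x' = '1' ∧ dn.contains (↑n : Int) = false
           then dn.insert ↑n jrow else dn).get? ↑i = dn.get? ↑i := by
        by_cases hcond : cs.getD n 'x' = '1' ∧ dn.contains (↑n : Int) = false
        · rw [if_pos hcond, PySem.Dict.get?_insert_of_ne _ _ hne]
        · rw [if_neg hcond]
      rw [hstep, hdn, ih]
      by_cases hc : d.contains ↑i = true
      · rw [if_pos hc, if_pos hc]
      · rw [if_neg hc, if_neg hc]
        by_cases hlt : i < n ∧ cs.getD i 'x' = '1'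
        · rw [if_pos hlt, if_pos ⟨by omega, hlt.2⟩]
        · rw [if_neg hlt, if_neg (by rintro ⟨ha, hb⟩; exact hlt ⟨by omega, hb⟩)]

theorem pvOuter_get? (rows : List String) (j0 : Int) (d : PySem.Dict Int Int) (i : Nat) :
    ((PySem.List.enumerate rows j0).foldl
      (fun d p =>
        (PySem.List.pyRange 0 (p.2.toList.length : Int) 1).foldl
          (fun d i' => if PySem.List.pyGetD p.2.toList i' 'x' = '1' ∧ d.contains i' = false
                       then d.insert i' p.1 else d) d) d).get? ↑i =
    if d.contains ↑i = true then d.get? ↑i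
    else if rows.findIdx (fun s => pvHas1 s i) < rows.length
      then some (j0 + ↑(rows.findIdx (fun s => pvHas1 s i))) else none := by
  induction rows generalizing j0 d with
  | nil =>
    rw [PySem.List.enumerate_nil, List.foldl_nil]
    by_cases hc : d.contains ↑i = true
    · rw [if_pos hc]
    · rw [if_neg hc, if_neg (by simp)]
      exact (PySem.Dict.get?_eq_none_iff_contains d ↑i).2 (by simpa using hc)
  | cons s tl ih =>
    rw [PySem.List.enumerate_cons, List.foldl_cons]
    dsimp only
    rw [PySem.List.pyRange_zero_natCast]
    set d1 := (((List.range s.toList.length).map (fun (k : Nat) => (k : Int))).foldl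
      (fun d i' => if PySem.List.pyGetD s.toList i' 'x' = '1' ∧ d.contains i' = false
                   then d.insert i' j0 else d) d) with hd1
    have hget1 : d1.get? ↑i = if d.contains ↑i = true then d.get? ↑i
        else if i < s.toList.length ∧ s.toList.getD i 'x' = '1' then some j0 else none := by
      rw [hd1]; exact pvInner_get? s.toList j0 s.toList.length d i
    rw [ih (j0 + 1) d1, List.findIdx_cons]
    by_cases hp : pvHas1 s i = true
    · have hcond := (pvHas1_iff s i).1 hp
      rw [hp, cond_true]
      by_cases hc : d.contains ↑i = true
      · have hd1c : d1.contains ↑i = true := by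
          rw [PySem.Dict.contains_eq_isSome_get?, hget1, if_pos hc,
            ← PySem.Dict.contains_eq_isSome_get?, hc]
        rw [if_pos hd1c, hget1, if_pos hc, if_pos hc]
      · have hd1c : d1.contains ↑i = true := by
          rw [PySem.Dict.contains_eq_isSome_get?, hget1, if_neg hc, if_pos hcond]
          rfl
        rw [if_pos hd1c, hget1, if_neg hc, if_pos hcond, if_neg hc,
          if_pos (by simp : 0 < (s :: tl).length)]
        simp
    · have hcond : ¬ (i < s.toList.length ∧ s.toList.getD i 'x' = '1') :=
        fun hh => hp ((pvHas1_iff s i).2 hh)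
      have hpf : pvHas1 s i = false := by
        cases h : pvHas1 s i
        · rfl
        · exact absurd h hp
      rw [hpf, cond_false]
      by_cases hc : d.contains ↑i = true
      · have hd1c : d1.contains ↑i = true := by
          rw [PySem.Dict.contains_eq_isSome_get?, hget1, if_pos hc,
            ← PySem.Dict.contains_eq_isSome_get?, hc]
        rw [if_pos hd1c, hget1, if_pos hc, if_pos hc]
      · have hd1n : d1.get? ↑i = none := by
          rw [hget1, if_neg hc, if_neg hcond]
        have hd1c : d1.contains ↑i = false := by
          rw [PySem.Dict.contains_eq_isSome_get?, hd1n]; rfl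
        rw [if_neg (by simp [hd1c]), if_neg hc]
        simp only [List.length_cons]
        by_cases hf : tl.findIdx (fun s => pvHas1 s i) < tl.length
        · rw [if_pos hf, if_pos (by omega)]
          congr 1
          push_cast
          ring
        · rw [if_neg hf, if_neg (by omega)]

theorem pvFirstOne_getD (timeline : List String) (i : Nat) :
    (pvFirstOne timeline).getD ↑i (timeline.length : Int) =
    ↑(timeline.findIdx (fun s => pvHas1 s i)) := by
  unfold pvFirstOne
  rw [PySem.Dict.getD_eq_get?_getD, pvOuter_get?,
    if_neg (by simp [PySem.Dict.contains_empty])]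
  by_cases h : timeline.findIdx (fun s => pvHas1 s i) < timeline.length
  · rw [if_pos h]
    simp
  · rw [if_neg h]
    have hle : timeline.findIdx (fun s => pvHas1 s i) ≤ timeline.length :=
      List.findIdx_le_length
    have : timeline.findIdx (fun s => pvHas1 s i) = timeline.length := by omega
    rw [this]
    rfl

theorem pvAny_take_iff {α : Type} (p : α → Bool) (l : List α) (m : Nat) (hm : m ≤ l.length) :
    (l.take m).any p = true ↔ l.findIdx p < m := by
  induction l generalizing m with
  | nil =>
    have : m = 0 := by simpa using hm
    subst this
    simp
  | cons a tl ih =>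
    cases m with
    | zero => simp
    | succ m' =>
      rw [List.take_succ_cons, List.any_cons, List.findIdx_cons]
      by_cases hp : p a = true
      · rw [hp, cond_true]
        simp
      · have hpf : p a = false := by
          cases h : p a
          · rfl
          · exact absurd h hp
        rw [hpf, cond_false, Bool.false_or, ih m' (by simpa using hm)]
        omega

theorem pvAlt_eq (timeline : List String) :
    adjusted_cumulative_coverage_alt timeline =
    (List.range timeline.length).map
      (fun j => String.ofList (pvRenderN (timeline.take (j + 1))
        ((timeline.getD j "").toList.length))) := by
  unfold adjusted_cumulative_coverage_alt
  dsimp only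
  apply List.ext_getElem
  · simp [PySem.List.length_enumerate]
  · intro j hj1 hj2
    have hj : j < timeline.length := by simpa [PySem.List.length_enumerate] using hj1
    simp only [List.getElem_map, PySem.List.getElem_enumerate, List.getElem_range]
    have hgd : timeline.getD j "" = timeline[j] := by
      rw [List.getD_eq_getElem?_getD, List.getElem?_eq_getElem hj, Option.getD_some]
    rw [hgd]
    unfold pvRenderN
    rw [PySem.List.pyRange_zero_natCast, List.map_map]
    congr 1
    apply List.map_congr_left
    intro i _
    simp only [Function.comp_apply]
    have hiff : ((pvFirstOne timeline).getD ↑i (timeline.length : Int) ≤ 0 + ↑j)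
        ↔ pvAnyB (timeline.take (j + 1)) i = true := by
      rw [pvFirstOne_getD, zero_add]
      unfold pvAnyB
      rw [pvAny_take_iff (fun s => pvHas1 s i) timeline (j + 1) (by omega)]
      constructor
      · intro h
        have : timeline.findIdx (fun s => pvHas1 s i) ≤ j := by exact_mod_cast h
        omega
      · intro h
        have : timeline.findIdx (fun s => pvHas1 s i) ≤ j := by omega
        exact_mod_cast this
    exact if_congr hiff rfl rfl

-- ===== VERDICT (by name: the statement is the Claim_ definition above) =====
theorem adjusted_cumulative_coverage_spec : Claim_equal_adjusted_cumulative_coverage := by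
  intro timeline _ hpre
  obtain ⟨hne, hch⟩ := hpre
  obtain ⟨h, t, rfl⟩ := List.exists_cons_of_ne_nil hne
  unfold Spec_adjusted_cumulative_coverage adjusted_cumulative_coverage
  dsimp only
  rw [pvAlt_eq, pvB_rec_nil]
  have hfirst : pvRowA (List.replicate ((h :: t).headD "").toList.length '0') h.toList =
      pvRenderN ([] ++ [h]) h.toList.length := by
    apply pvStepNew [] h h
    · simp
    · intro i hi
      have hi' : i < ((h :: t).headD "").toList.length := by simpa using hi
      rw [List.getD_eq_getElem?_getD, List.getElem?_replicate, if_pos hi']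
      simp [pvAnyB]
    · rw [List.drop_length]; rfl
  simp only [List.foldl_cons]
  rw [hfirst]
  rw [pvA_fold t [h] h (pvRenderN ([] ++ [h]) h.toList.length) _ hch (pvRenderN_length _ _) ?_]
  · simp [pvBRec]
  · intro i hi
    rw [pvRenderN_length] at hi
    rw [pvRenderN_getD _ _ _ hi]
    cases hpv : pvAnyB ([] ++ [h]) i <;> simp <;> simpa using hpv
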